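-- pv_equiv track=rewrite | github.com/zch401/my_projects | hog/hog.py | is_perfect_piggy
-- ===== SOURCE A (Python) =====
-- def is_perfect_piggy(turn_score):
--     """Returns whether the Perfect Piggy dice-swapping rule should occur."""
--     # BEGIN PROBLEM 4
--     if turn_score == 1:
--         return False
--
--     for i in range(1, 15):
--         if turn_score == i*i or turn_score == i*i*i:
--             return True
--         elif i*i > turn_score:
--             break
--
--     return False
-- ===== SOURCE B (Python) =====
-- def is_perfect_piggy(turn_score):
--     """Returns whether the Perfect Piggy dice-swapping rule should occur."""
--     if turn_score <= 1:
--         return False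
--
--     def exhausts(n, deltas):
--         # n is a perfect k-th power (root <= 14) iff repeatedly subtracting the
--         # successive differences of the powers drains n exactly to zero.
--         for d in deltas:
--             if n <= 0:
--                 break
--             n -= d
--         return n == 0
--
--     square_deltas = [2 * k - 1 for k in range(1, 15)]       # k^2 - (k-1)^2
--     cube_deltas = [3 * k * k - 3 * k + 1 for k in range(1, 15)]  # k^3 - (k-1)^3
--     return exhausts(turn_score, square_deltas) or exhausts(turn_score, cube_deltas)
-- ===== Notes on version B (the rewrite author's own statement) =====
-- stated objective: alternative
-- what changed: Replaces root enumeration (testing turn_score against i*i and i*i*i for each candidate root) by a successive-differences drain: repeatedly subtract consecutive odd numbers (resp. consecutive cube gaps 3k^2-3k+1) and report a hit iff the score drains exactly to zero before the bounded delta list runs out.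
import Mathlib
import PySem

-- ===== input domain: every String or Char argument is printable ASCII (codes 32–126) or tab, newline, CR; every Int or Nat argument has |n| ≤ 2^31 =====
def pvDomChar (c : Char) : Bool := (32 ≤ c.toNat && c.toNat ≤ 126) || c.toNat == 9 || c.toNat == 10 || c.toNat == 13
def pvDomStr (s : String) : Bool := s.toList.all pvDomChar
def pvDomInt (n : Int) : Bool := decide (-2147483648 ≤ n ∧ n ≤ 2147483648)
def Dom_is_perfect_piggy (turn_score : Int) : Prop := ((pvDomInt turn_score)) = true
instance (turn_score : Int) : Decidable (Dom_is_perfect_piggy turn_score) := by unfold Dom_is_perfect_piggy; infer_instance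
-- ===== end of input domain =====

-- B detects squares/cubes by draining the score with successive power differences
-- (the sum of the first k odd numbers is k^2; the sum of 3k^2-3k+1 for k = 1..k is k^3)
-- instead of comparing the score with each candidate root's powers (alternative).

-- ===== PORT A =====
-- the for-loop over range(1, 15) with early 'return True' and 'break'
def piggyLoop : List Int → Int → Bool
  | [], _ => false
  | i :: rest, t =>
      if t == i * i || t == i * i * i then true
      else if i * i > t then false
      else piggyLoop rest t

def is_perfect_piggy (turn_score : Int) : Bool :=
  if turn_score == 1 then false
  else piggyLoop (PySem.List.pyRange 1 15 1) turn_score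

-- ===== PORT B =====
-- helper 'exhausts': 'for d in deltas: if n <= 0: break; n -= d' then 'return n == 0'
def piggyExhausts : Int → List Int → Bool
  | n, [] => n == 0
  | n, d :: ds => if n ≤ 0 then n == 0 else piggyExhausts (n - d) ds

def is_perfect_piggy_alt (turn_score : Int) : Bool :=
  if turn_score ≤ 1 then false
  else
    let square_deltas : List Int := (PySem.List.pyRange 1 15 1).map fun k => 2 * k - 1
    let cube_deltas : List Int := (PySem.List.pyRange 1 15 1).map fun k => 3 * k * k - 3 * k + 1
    piggyExhausts turn_score square_deltas || piggyExhausts turn_score cube_deltas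

-- ===== PRECONDITION & SPEC =====
def Spec_is_perfect_piggy (turn_score : Int) (out : Bool) : Prop := out = is_perfect_piggy_alt turn_score
instance (turn_score : Int) (out : Bool) : Decidable (Spec_is_perfect_piggy turn_score out) := by unfold Spec_is_perfect_piggy; infer_instance

-- ===== CLAIM (what is proved, stated in full; the proofs are below) =====
def Claim_equal_is_perfect_piggy : Prop := ∀ (turn_score : Int), Dom_is_perfect_piggy turn_score → Spec_is_perfect_piggy turn_score (is_perfect_piggy turn_score)

-- ===== LEMMAS AND PROOFS =====
theorem sq_char (t : Int) :
    piggyExhausts t ((PySem.List.pyRange 1 15 1).map fun k => 2 * k - 1)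
      = decide (t = 0 ∨ t = 1 ∨ t = 4 ∨ t = 9 ∨ t = 16 ∨ t = 25 ∨ t = 36 ∨ t = 49 ∨ t = 64 ∨ t = 81 ∨ t = 100 ∨ t = 121 ∨ t = 144 ∨ t = 169 ∨ t = 196) := by
  rw [show ((PySem.List.pyRange 1 15 1).map fun k => 2 * k - 1)
      = ([1, 3, 5, 7, 9, 11, 13, 15, 17, 19, 21, 23, 25, 27] : List Int) from by decide]
  simp only [piggyExhausts]
  norm_num
  by_cases hs0 : t ≤ 0
  · rw [if_pos hs0]
    rw [Bool.eq_iff_iff]; simp only [beq_iff_eq, Bool.or_eq_true, decide_eq_true_eq]; omega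
  rw [if_neg hs0]
  by_cases hs1 : t ≤ 1
  · rw [if_pos hs1]
    rw [Bool.eq_iff_iff]; simp only [beq_iff_eq, Bool.or_eq_true, decide_eq_true_eq]; omega
  rw [if_neg hs1]
  by_cases hs2 : t ≤ 4
  · rw [if_pos hs2]
    rw [Bool.eq_iff_iff]; simp only [beq_iff_eq, Bool.or_eq_true, decide_eq_true_eq]; omega
  rw [if_neg hs2]
  by_cases hs3 : t ≤ 9
  · rw [if_pos hs3]
    rw [Bool.eq_iff_iff]; simp only [beq_iff_eq, Bool.or_eq_true, decide_eq_true_eq]; omega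
  rw [if_neg hs3]
  by_cases hs4 : t ≤ 16
  · rw [if_pos hs4]
    rw [Bool.eq_iff_iff]; simp only [beq_iff_eq, Bool.or_eq_true, decide_eq_true_eq]; omega
  rw [if_neg hs4]
  by_cases hs5 : t ≤ 25
  · rw [if_pos hs5]
    rw [Bool.eq_iff_iff]; simp only [beq_iff_eq, Bool.or_eq_true, decide_eq_true_eq]; omega
  rw [if_neg hs5]
  by_cases hs6 : t ≤ 36
  · rw [if_pos hs6]
    rw [Bool.eq_iff_iff]; simp only [beq_iff_eq, Bool.or_eq_true, decide_eq_true_eq]; omega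
  rw [if_neg hs6]
  by_cases hs7 : t ≤ 49
  · rw [if_pos hs7]
    rw [Bool.eq_iff_iff]; simp only [beq_iff_eq, Bool.or_eq_true, decide_eq_true_eq]; omega
  rw [if_neg hs7]
  by_cases hs8 : t ≤ 64
  · rw [if_pos hs8]
    rw [Bool.eq_iff_iff]; simp only [beq_iff_eq, Bool.or_eq_true, decide_eq_true_eq]; omega
  rw [if_neg hs8]
  by_cases hs9 : t ≤ 81
  · rw [if_pos hs9]
    rw [Bool.eq_iff_iff]; simp only [beq_iff_eq, Bool.or_eq_true, decide_eq_true_eq]; omega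
  rw [if_neg hs9]
  by_cases hs10 : t ≤ 100
  · rw [if_pos hs10]
    rw [Bool.eq_iff_iff]; simp only [beq_iff_eq, Bool.or_eq_true, decide_eq_true_eq]; omega
  rw [if_neg hs10]
  by_cases hs11 : t ≤ 121
  · rw [if_pos hs11]
    rw [Bool.eq_iff_iff]; simp only [beq_iff_eq, Bool.or_eq_true, decide_eq_true_eq]; omega
  rw [if_neg hs11]
  by_cases hs12 : t ≤ 144
  · rw [if_pos hs12]
    rw [Bool.eq_iff_iff]; simp only [beq_iff_eq, Bool.or_eq_true, decide_eq_true_eq]; omega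
  rw [if_neg hs12]
  by_cases hs13 : t ≤ 169
  · rw [if_pos hs13]
    rw [Bool.eq_iff_iff]; simp only [beq_iff_eq, Bool.or_eq_true, decide_eq_true_eq]; omega
  rw [if_neg hs13]
  rw [Bool.eq_iff_iff]; simp only [beq_iff_eq, Bool.or_eq_true, decide_eq_true_eq]; omega
theorem cb_char (t : Int) :
    piggyExhausts t ((PySem.List.pyRange 1 15 1).map fun k => 3 * k * k - 3 * k + 1)
      = decide (t = 0 ∨ t = 1 ∨ t = 8 ∨ t = 27 ∨ t = 64 ∨ t = 125 ∨ t = 216 ∨ t = 343 ∨ t = 512 ∨ t = 729 ∨ t = 1000 ∨ t = 1331 ∨ t = 1728 ∨ t = 2197 ∨ t = 2744) := by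
  rw [show ((PySem.List.pyRange 1 15 1).map fun k => 3 * k * k - 3 * k + 1)
      = ([1, 7, 19, 37, 61, 91, 127, 169, 217, 271, 331, 397, 469, 547] : List Int) from by decide]
  simp only [piggyExhausts]
  norm_num
  by_cases hc0 : t ≤ 0
  · rw [if_pos hc0]
    rw [Bool.eq_iff_iff]; simp only [beq_iff_eq, Bool.or_eq_true, decide_eq_true_eq]; omega
  rw [if_neg hc0]
  by_cases hc1 : t ≤ 1
  · rw [if_pos hc1]
    rw [Bool.eq_iff_iff]; simp only [beq_iff_eq, Bool.or_eq_true, decide_eq_true_eq]; omega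
  rw [if_neg hc1]
  by_cases hc2 : t ≤ 8
  · rw [if_pos hc2]
    rw [Bool.eq_iff_iff]; simp only [beq_iff_eq, Bool.or_eq_true, decide_eq_true_eq]; omega
  rw [if_neg hc2]
  by_cases hc3 : t ≤ 27
  · rw [if_pos hc3]
    rw [Bool.eq_iff_iff]; simp only [beq_iff_eq, Bool.or_eq_true, decide_eq_true_eq]; omega
  rw [if_neg hc3]
  by_cases hc4 : t ≤ 64
  · rw [if_pos hc4]
    rw [Bool.eq_iff_iff]; simp only [beq_iff_eq, Bool.or_eq_true, decide_eq_true_eq]; omega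
  rw [if_neg hc4]
  by_cases hc5 : t ≤ 125
  · rw [if_pos hc5]
    rw [Bool.eq_iff_iff]; simp only [beq_iff_eq, Bool.or_eq_true, decide_eq_true_eq]; omega
  rw [if_neg hc5]
  by_cases hc6 : t ≤ 216
  · rw [if_pos hc6]
    rw [Bool.eq_iff_iff]; simp only [beq_iff_eq, Bool.or_eq_true, decide_eq_true_eq]; omega
  rw [if_neg hc6]
  by_cases hc7 : t ≤ 343
  · rw [if_pos hc7]
    rw [Bool.eq_iff_iff]; simp only [beq_iff_eq, Bool.or_eq_true, decide_eq_true_eq]; omega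
  rw [if_neg hc7]
  by_cases hc8 : t ≤ 512
  · rw [if_pos hc8]
    rw [Bool.eq_iff_iff]; simp only [beq_iff_eq, Bool.or_eq_true, decide_eq_true_eq]; omega
  rw [if_neg hc8]
  by_cases hc9 : t ≤ 729
  · rw [if_pos hc9]
    rw [Bool.eq_iff_iff]; simp only [beq_iff_eq, Bool.or_eq_true, decide_eq_true_eq]; omega
  rw [if_neg hc9]
  by_cases hc10 : t ≤ 1000
  · rw [if_pos hc10]
    rw [Bool.eq_iff_iff]; simp only [beq_iff_eq, Bool.or_eq_true, decide_eq_true_eq]; omega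
  rw [if_neg hc10]
  by_cases hc11 : t ≤ 1331
  · rw [if_pos hc11]
    rw [Bool.eq_iff_iff]; simp only [beq_iff_eq, Bool.or_eq_true, decide_eq_true_eq]; omega
  rw [if_neg hc11]
  by_cases hc12 : t ≤ 1728
  · rw [if_pos hc12]
    rw [Bool.eq_iff_iff]; simp only [beq_iff_eq, Bool.or_eq_true, decide_eq_true_eq]; omega
  rw [if_neg hc12]
  by_cases hc13 : t ≤ 2197
  · rw [if_pos hc13]
    rw [Bool.eq_iff_iff]; simp only [beq_iff_eq, Bool.or_eq_true, decide_eq_true_eq]; omega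
  rw [if_neg hc13]
  rw [Bool.eq_iff_iff]; simp only [beq_iff_eq, Bool.or_eq_true, decide_eq_true_eq]; omega

theorem loop_char (t : Int) :
    piggyLoop (PySem.List.pyRange 1 15 1) t
      = decide (t = 1 ∨ t = 4 ∨ t = 8 ∨ t = 9 ∨ t = 16 ∨ t = 25 ∨ t = 27 ∨ t = 36 ∨ t = 49 ∨ t = 64 ∨ t = 81 ∨ t = 100 ∨ t = 121 ∨ t = 125 ∨ t = 144 ∨ t = 169 ∨ t = 196 ∨ t = 216 ∨ t = 343 ∨ t = 512 ∨ t = 729 ∨ t = 1000 ∨ t = 1331 ∨ t = 1728 ∨ t = 2197 ∨ t = 2744) := by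
  rw [show PySem.List.pyRange 1 15 1 = ([1,2,3,4,5,6,7,8,9,10,11,12,13,14] : List Int) from by decide]
  simp only [piggyLoop]
  norm_num
  rw [Bool.eq_iff_iff]
  simp only [Bool.and_eq_true, Bool.or_eq_true, Bool.not_eq_true', decide_eq_true_eq,
    decide_eq_false_iff_not]
  omega

theorem piggy_eq (t : Int) : is_perfect_piggy t = is_perfect_piggy_alt t := by
  unfold is_perfect_piggy is_perfect_piggy_alt
  rw [Bool.eq_iff_iff]
  by_cases h1 : t = 1
  · simp [h1]
  by_cases h2 : t ≤ 1
  · simp only [if_neg (by simp [h1] : ¬ (t == 1) = true), if_pos h2, loop_char]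
    simp only [Bool.false_eq_true, decide_eq_true_eq, iff_false]
    omega
  · simp only [if_neg (by simp [h1] : ¬ (t == 1) = true), if_neg h2,
      loop_char, sq_char, cb_char]
    simp only [Bool.or_eq_true, decide_eq_true_eq]
    omega

-- ===== VERDICT (by name: the statement is the Claim_ definition above) =====
theorem is_perfect_piggy_spec : Claim_equal_is_perfect_piggy := by
  intro t _
  exact piggy_eq t
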